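-- pv_equiv track=rewrite | github.com/vithaluntold/rai-compliance-frontend | render-backend/chunked_compliance_analyzer.py | _extract_all_questions
-- ===== SOURCE A (Python) =====
-- from typing import Any, Dict, List
--
-- def _extract_all_questions(checklist_data: Dict[str, Any]) -> List[str]:
--     """Extract all questions from checklist data"""
--     questions = []
--
--     if "sections" in checklist_data:
--         for section_data in checklist_data["sections"]:
--             if "items" in section_data:
--                 for item in section_data["items"]:
--                     question = item.get("question", "")
--                     if question and question not in questions:
--                         questions.append(question)
--
--     return questions
-- ===== SOURCE B (Python) =====
-- def _extract_all_questions(checklist_data):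
--     """Extract all questions from checklist data"""
--     # Phase 1: gather every non-empty question in encounter order (no dedup).
--     flat = []
--     if "sections" in checklist_data:
--         for section_data in checklist_data["sections"]:
--             if "items" in section_data:
--                 for item in section_data["items"]:
--                     question = item.get("question", "")
--                     if question:
--                         flat.append(question)
--     # Phase 2: map each distinct question to the index of its first occurrence.
--     first = {}
--     for i, question in enumerate(flat):
--         first.setdefault(question, i)
--     # Phase 3: the answer is the distinct questions ordered by first occurrence.
--     return sorted(first, key=first.get)
-- ===== Notes on version B (the rewrite author's own statement) =====
-- stated objective: alternative
-- what changed: A dedups on the fly with a 'question not in questions' list scan inside the nested loop; B instead gathers all non-empty questions flat, builds a first-occurrence-index map with setdefault, and produces the result by sorting the distinct questions by that first index.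
import Mathlib
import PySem

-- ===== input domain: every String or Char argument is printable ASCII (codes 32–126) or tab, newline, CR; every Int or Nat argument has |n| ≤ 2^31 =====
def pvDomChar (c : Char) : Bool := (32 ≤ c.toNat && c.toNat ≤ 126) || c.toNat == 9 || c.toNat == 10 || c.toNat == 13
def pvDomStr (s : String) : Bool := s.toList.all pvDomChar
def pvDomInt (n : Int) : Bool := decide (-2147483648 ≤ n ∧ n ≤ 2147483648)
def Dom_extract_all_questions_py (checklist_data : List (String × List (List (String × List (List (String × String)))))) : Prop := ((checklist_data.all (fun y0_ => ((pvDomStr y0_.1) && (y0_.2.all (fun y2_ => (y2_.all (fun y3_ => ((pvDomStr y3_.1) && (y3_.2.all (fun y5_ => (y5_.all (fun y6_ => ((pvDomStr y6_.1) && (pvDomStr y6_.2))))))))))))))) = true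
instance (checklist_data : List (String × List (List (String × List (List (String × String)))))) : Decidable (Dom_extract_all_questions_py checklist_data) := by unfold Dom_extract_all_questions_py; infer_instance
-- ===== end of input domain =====

-- B replaces A's interleaved membership-scan dedup by three phases: gather all non-empty questions, map each to its first-occurrence index via setdefault, and sort the distinct questions by that index (alternative decomposition, same return value).


-- ===== PORT A =====
-- literal transliteration: 'sections'/'items' membership as first-match lookup, nested loops as
-- foldl, the 'question not in questions' membership test kept inside the inner loop
def extract_all_questions_py (checklist_data : List (String × List (List (String × List (List (String × String)))))) : List String :=
  match checklist_data.lookup "sections" with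
  | none => []
  | some sections =>
    sections.foldl (fun questions section_data =>
      match section_data.lookup "items" with
      | none => questions
      | some items =>
        items.foldl (fun qs item =>
          let question := (item.lookup "question").getD ""
          if question ≠ "" ∧ question ∉ qs then qs ++ [question] else qs) questions) []

-- ===== PORT B =====
-- phase 1 of Source B: the gather loop appending every non-empty question, no dedup
def pvGather_extract_all_questions_py (checklist_data : List (String × List (List (String × List (List (String × String)))))) : List String :=
  match checklist_data.lookup "sections" with
  | none => []
  | some sections =>
    sections.foldl (fun flat section_data =>
      match section_data.lookup "items" with
      | none => flat
      | some items =>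
        items.foldl (fun fl item =>
          let question := (item.lookup "question").getD ""
          if question ≠ "" then fl ++ [question] else fl) flat) []

-- phases 2+3 of Source B: first-occurrence-index map via setdefault, then sort the distinct
-- questions by that index (first.get never returns None on a key of first, so getD _ 0 is exact)
def extract_all_questions_py_alt (checklist_data : List (String × List (List (String × List (List (String × String)))))) : List String :=
  let flat := pvGather_extract_all_questions_py checklist_data
  let first := (PySem.List.enumerate flat).foldl (fun d p => d.setdefault p.2 p.1) PySem.Dict.empty
  PySem.List.sorted first.keys (fun q => first.getD q 0) false

-- ===== PRECONDITION & SPEC =====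
def Spec_extract_all_questions_py (checklist_data : List (String × List (List (String × List (List (String × String)))))) (out : List String) : Prop := out = extract_all_questions_py_alt checklist_data
instance (checklist_data : List (String × List (List (String × List (List (String × String)))))) (out : List String) : Decidable (Spec_extract_all_questions_py checklist_data out) := by unfold Spec_extract_all_questions_py; infer_instance

-- ===== CLAIM (what is proved, stated in full; the proofs are below) =====
def Claim_equal_extract_all_questions_py : Prop := ∀ (checklist_data : List (String × List (List (String × List (List (String × String)))))), Dom_extract_all_questions_py checklist_data → Spec_extract_all_questions_py checklist_data (extract_all_questions_py checklist_data)

-- ===== LEMMAS AND PROOFS =====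

-- the questions gathered from one section's items, as a pure expression
def pvInnerG (items : List (List (String × String))) : List String :=
  (items.map (fun item => (item.lookup "question").getD "")).filter (fun q => q ≠ "")

-- A's inner-loop step is Set.add on non-empty questions
lemma step_eq_add (qs : List String) (q : String) :
    (if q ≠ "" ∧ q ∉ qs then qs ++ [q] else qs) =
      (if q = "" then qs else PySem.Set.add qs q) := by
  by_cases h : q = "" <;> by_cases hm : q ∈ qs <;>
    simp [h, hm, PySem.Set.add, PySem.Set.contains]

-- A's inner loop = foldl Set.add over the section's non-empty questions
lemma innerA_eq (items : List (List (String × String))) (acc : List String) :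
    items.foldl (fun qs item =>
        if (item.lookup "question").getD "" ≠ "" ∧ (item.lookup "question").getD "" ∉ qs then
          qs ++ [(item.lookup "question").getD ""] else qs) acc =
      (pvInnerG items).foldl PySem.Set.add acc := by
  induction items generalizing acc with
  | nil => rfl
  | cons item rest ih =>
    simp only [pvInnerG, List.foldl_cons, List.map_cons, List.filter_cons]
    rw [step_eq_add]
    by_cases h : ((item.lookup "question").getD "") = "" <;>
      simp [pvInnerG, h, ih]

-- A's outer loop = foldl Set.add over all gathered questions
lemma outerA_eq (sections : List (List (String × List (List (String × String)))))
    (acc : List String) :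
    sections.foldl (fun questions section_data =>
        match section_data.lookup "items" with
        | none => questions
        | some items =>
          items.foldl (fun qs item =>
            let question := (item.lookup "question").getD ""
            if question ≠ "" ∧ question ∉ qs then qs ++ [question] else qs) questions) acc =
      (sections.flatMap (fun section_data =>
          match section_data.lookup "items" with
          | none => []
          | some items => pvInnerG items)).foldl PySem.Set.add acc := by
  induction sections generalizing acc with
  | nil => rfl
  | cons sd rest ih =>
    simp only [List.foldl_cons, List.flatMap_cons, List.foldl_append]
    cases h : sd.lookup "items" with
    | none => simpa [h] using ih acc
    | some items => rw [ih]; dsimp only; rw [innerA_eq]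

-- B's inner gather loop appends the section's non-empty questions
lemma innerB_eq (items : List (List (String × String))) (acc : List String) :
    items.foldl (fun fl item =>
        if (item.lookup "question").getD "" ≠ "" then
          fl ++ [(item.lookup "question").getD ""] else fl) acc =
      acc ++ pvInnerG items := by
  induction items generalizing acc with
  | nil => simp [pvInnerG]
  | cons item rest ih =>
    simp only [List.foldl_cons]
    by_cases h : ((item.lookup "question").getD "") = ""
    · simpa [pvInnerG, h] using ih acc
    · simpa [pvInnerG, h, List.append_assoc] using
        ih (acc ++ [(item.lookup "question").getD ""])

-- B's outer gather loop = flatMap of the per-section questions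
lemma outerB_eq (sections : List (List (String × List (List (String × String)))))
    (acc : List String) :
    sections.foldl (fun flat section_data =>
        match section_data.lookup "items" with
        | none => flat
        | some items =>
          items.foldl (fun fl item =>
            let question := (item.lookup "question").getD ""
            if question ≠ "" then fl ++ [question] else fl) flat) acc =
      acc ++ (sections.flatMap (fun section_data =>
          match section_data.lookup "items" with
          | none => []
          | some items => pvInnerG items)) := by
  induction sections generalizing acc with
  | nil => simp
  | cons sd rest ih =>
    simp only [List.foldl_cons, List.flatMap_cons]
    cases h : sd.lookup "items" with
    | none => simpa [h] using ih acc
    | some items =>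
      dsimp only
      rw [ih, innerB_eq, List.append_assoc]

-- hence A's result is the ordered dedup (Set.ofList) of B's gathered list
lemma A_eq_ofList_gather (cd : List (String × List (List (String × List (List (String × String)))))) :
    extract_all_questions_py cd = PySem.Set.ofList (pvGather_extract_all_questions_py cd) := by
  unfold extract_all_questions_py pvGather_extract_all_questions_py
  cases h : cd.lookup "sections" with
  | none => rfl
  | some sections =>
    dsimp only
    rw [outerA_eq, outerB_eq, List.nil_append, PySem.Set.ofList_eq_foldl]

-- the setdefault loop: keys collect the distinct questions (Set.add), stay Nodup, and the
-- stored first-occurrence indices are strictly increasing along the items list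
lemma build_first (flat : List String) :
    ∀ (s : Int) (d : PySem.Dict String Int),
      d.keys.Nodup → d.items.Pairwise (fun a b => a.2 < b.2) → (∀ p ∈ d.items, p.2 < s) →
      (((PySem.List.enumerate flat s).foldl (fun d p => d.setdefault p.2 p.1) d).keys
          = flat.foldl PySem.Set.add d.keys)
      ∧ ((PySem.List.enumerate flat s).foldl (fun d p => d.setdefault p.2 p.1) d).keys.Nodup
      ∧ ((PySem.List.enumerate flat s).foldl (fun d p => d.setdefault p.2 p.1) d).items.Pairwise
          (fun a b => a.2 < b.2) := by
  induction flat with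
  | nil =>
    intro s d hnd hpw hlt
    exact ⟨rfl, hnd, hpw⟩
  | cons q rest ih =>
    intro s d hnd hpw hlt
    rw [PySem.List.enumerate_cons]
    simp only [List.foldl_cons]
    by_cases hc : d.contains q = true
    · rw [PySem.Dict.setdefault_of_contains _ _ hc]
      have hmem : q ∈ d.keys := (PySem.Dict.contains_iff_mem_keys _ _).mp hc
      rw [PySem.Set.add_of_mem hmem]
      exact ih (s + 1) d hnd hpw (fun p hp => by have := hlt p hp; omega)
    · have hc' : d.contains q = false := by simpa using hc
      rw [PySem.Dict.setdefault_of_not_contains _ _ hc']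
      have hnmem : q ∉ d.keys := fun hm => by
        rw [(PySem.Dict.contains_iff_mem_keys _ _).mpr hm] at hc'; cases hc'
      have hkeys : (d.insert q s).keys = d.keys ++ [q] :=
        PySem.Dict.keys_insert_of_not_contains _ _ hc'
      have hitems : (d.insert q s).items = d.items ++ [(q, s)] :=
        PySem.Dict.items_insert_of_not_contains _ _ hc'
      have hnd' : (d.insert q s).keys.Nodup := by
        rw [hkeys]
        simp only [List.nodup_append, List.nodup_singleton]
        exact ⟨hnd, trivial, fun a ha b hb => by
          rcases List.mem_singleton.mp hb with rfl; exact fun h => hnmem (h ▸ ha)⟩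
      have hpw' : (d.insert q s).items.Pairwise (fun a b => a.2 < b.2) := by
        rw [hitems]
        refine List.pairwise_append.mpr ⟨hpw, List.pairwise_singleton _ _, ?_⟩
        intro a ha b hb
        rcases List.mem_singleton.mp hb with rfl
        exact hlt a ha
      have hlt' : ∀ p ∈ (d.insert q s).items, p.2 < s + 1 := by
        intro p hp
        rw [hitems] at hp
        rcases List.mem_append.mp hp with h | h
        · have := hlt p h; omega
        · rcases List.mem_singleton.mp h with rfl; omega
      rw [PySem.Set.add_of_not_mem hnmem, ← hkeys]
      exact ih (s + 1) (d.insert q s) hnd' hpw' hlt'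

-- ===== VERDICT (by name: the statement is the Claim_ definition above) =====
theorem extract_all_questions_py_spec : Claim_equal_extract_all_questions_py := by
  intro cd _
  unfold Spec_extract_all_questions_py extract_all_questions_py_alt
  dsimp only
  set flat := pvGather_extract_all_questions_py cd with hflat
  set first := (PySem.List.enumerate flat).foldl (fun d p => d.setdefault p.2 p.1) PySem.Dict.empty with hfirst
  have hbuild := build_first flat 0 PySem.Dict.empty
    (by simp only [show (PySem.Dict.empty : PySem.Dict String Int).keys = [] from rfl]; exact List.nodup_nil)
    (by simp only [show (PySem.Dict.empty : PySem.Dict String Int).items = [] from rfl]; exact List.Pairwise.nil)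
    (by intro p hp; simp only [show (PySem.Dict.empty : PySem.Dict String Int).items = [] from rfl] at hp; cases hp)
  obtain ⟨hkeys, hnd, hpw⟩ := hbuild
  have hkeys' : first.keys = PySem.Set.ofList flat := by
    rw [hfirst, hkeys, PySem.Set.ofList_eq_foldl]; rfl
  -- the key function is strictly increasing along first.keys
  have hitems : first.items = first.keys.map (fun k => (k, first.getD k 0)) :=
    PySem.Dict.items_eq_map_keys first hnd 0
  have hkpw : first.keys.Pairwise (fun a b => (fun q => first.getD q 0) a < (fun q => first.getD q 0) b) := by
    have := hpw
    rw [hitems, List.pairwise_map] at this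
    exact this
  rw [PySem.List.sorted_eq_of_perm_of_pairwise_lt first.keys first.keys
    (fun q => first.getD q 0) (List.Perm.refl _) hkpw, hkeys', A_eq_ofList_gather]
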